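-- pv_equiv track=rewrite | github.com/brunowenzel07/rpost | rpost/spiders/rpspider.py | getdistance
-- ===== SOURCE A (Python) =====
-- def getdistance(distancegoing):
--     '''2 cases: case1: has dot then decimal'''
--     res = ""
--     if '.' in distancegoing:
--         d1 = ''.join( ''.join([ i for i in distancegoing.split(".")[0]if i.isdigit() ])   )
--         d2 = ''.join( ''.join([ i for i in distancegoing.split(".")[1]if i.isdigit() ])   )
--         res = d1 + '.' + d2
--     else:
--         res =''.join( ''.join([ i for i in distancegoing if i.isdigit() ])   )
--     return res
-- ===== SOURCE B (Python) =====
-- def getdistance(distancegoing):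
--     """Single linear scan: keep digits, emit the first '.' once, stop at a second '.'."""
--     res = []
--     dots = 0
--     for ch in distancegoing:
--         if ch == '.':
--             if dots == 0:
--                 res.append('.')
--                 dots = 1
--             else:
--                 break
--         elif ch.isdigit():
--             res.append(ch)
--     return ''.join(res)
-- ===== Notes on version B (the rewrite author's own statement) =====
-- stated objective: simpler
-- what changed: Replaced the split-on-dot-twice-plus-two-comprehensions construction with one linear scan that appends digits, emits the first dot once, and stops at a second dot.
import Mathlib
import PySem

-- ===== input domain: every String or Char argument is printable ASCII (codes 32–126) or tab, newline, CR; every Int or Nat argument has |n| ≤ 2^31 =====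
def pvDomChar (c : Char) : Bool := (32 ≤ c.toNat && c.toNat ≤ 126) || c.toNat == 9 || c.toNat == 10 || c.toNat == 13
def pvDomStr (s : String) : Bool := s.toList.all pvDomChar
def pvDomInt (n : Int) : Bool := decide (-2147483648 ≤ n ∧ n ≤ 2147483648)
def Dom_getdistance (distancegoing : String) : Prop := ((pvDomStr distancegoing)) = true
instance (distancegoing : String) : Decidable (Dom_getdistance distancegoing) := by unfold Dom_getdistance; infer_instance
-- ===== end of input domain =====

-- B replaces A's split('.')-twice-plus-comprehensions construction by one linear scan
-- over the characters (objective: simpler); return values proved equal on all inputs.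


-- ===== PORT A =====
-- Literal port of A on the char list: '.' in s; s.split('.')[0] / [1]; the
-- ''.join([i for i in seg if i.isdigit()]) comprehension is List.filter; d1 + '.' + d2.
-- The [0]/[1] indexings are in range because '.' ∈ s guarantees split gives ≥ 2 parts,
-- so pyGet? is some there and the .getD [] default is never used.
def getdistance (distancegoing : String) : String :=
  let cs := distancegoing.toList
  if PySem.Chars.isIn ['.'] cs then
    let parts := PySem.Chars.splitOn cs ['.']
    let d1 := ((PySem.List.pyGet? parts 0).getD []).filter PySem.Chars.isdigit
    let d2 := ((PySem.List.pyGet? parts 1).getD []).filter PySem.Chars.isdigit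
    String.ofList (d1 ++ '.' :: d2)
  else
    String.ofList (cs.filter PySem.Chars.isdigit)

-- ===== PORT B =====
-- Source B's scan: dots counts the '.' seen; digits are kept, the first '.' is emitted,
-- the second '.' breaks the loop (structural recursion returns the accumulator so far).
def pvScanB : List Char → Nat → List Char
  | [], _ => []
  | c :: cs, dots =>
    if c = '.' then
      if dots = 0 then '.' :: pvScanB cs 1 else []
    else if PySem.Chars.isdigit c then c :: pvScanB cs dots
    else pvScanB cs dots

def getdistance_alt (distancegoing : String) : String :=
  String.ofList (pvScanB distancegoing.toList 0)

-- ===== PRECONDITION & SPEC =====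
def Spec_getdistance (distancegoing : String) (out : String) : Prop := out = getdistance_alt distancegoing
instance (distancegoing : String) (out : String) : Decidable (Spec_getdistance distancegoing out) := by unfold Spec_getdistance; infer_instance

-- ===== CLAIM (what is proved, stated in full; the proofs are below) =====
def Claim_equal_getdistance : Prop := ∀ (distancegoing : String), Dom_getdistance distancegoing → Spec_getdistance distancegoing (getdistance distancegoing)

-- ===== LEMMAS AND PROOFS =====

def pvNotDot (c : Char) : Bool := c ≠ '.'

-- Reference shape of Python's str.split with the one-char separator '.'.
def pySplitDot (cs : List Char) : List (List Char) :=
  match h : cs.dropWhile pvNotDot with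
  | [] => [cs.takeWhile pvNotDot]
  | _ :: t => cs.takeWhile pvNotDot :: pySplitDot t
termination_by cs.length
decreasing_by
  have hle := List.length_dropWhile_le pvNotDot cs
  rw [h] at hle
  simp at hle
  omega

lemma pySplitDot_eq (cs : List Char) :
    pySplitDot cs =
      match cs.dropWhile pvNotDot with
      | [] => [cs.takeWhile pvNotDot]
      | _ :: t => cs.takeWhile pvNotDot :: pySplitDot t := by
  rw [pySplitDot]
  rcases h : cs.dropWhile pvNotDot with _ | ⟨d, t⟩ <;> simp

lemma pySplitDot_ne_nil (cs : List Char) : pySplitDot cs ≠ [] := by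
  rw [pySplitDot_eq]
  split <;> simp

def pvMapFirst (f : List Char → List Char) : List (List Char) → List (List Char)
  | [] => []
  | x :: xs => f x :: xs

lemma pySplitDot_nil : pySplitDot [] = [[]] := by
  rw [pySplitDot_eq]; rfl

lemma pySplitDot_cons_dot (rest : List Char) :
    pySplitDot ('.' :: rest) = [] :: pySplitDot rest := by
  rw [pySplitDot_eq]
  simp [List.dropWhile, List.takeWhile, pvNotDot]

lemma pySplitDot_cons_ne (c : Char) (rest : List Char) (hc : c ≠ '.') :
    pySplitDot (c :: rest) = pvMapFirst (c :: ·) (pySplitDot rest) := by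
  rw [pySplitDot_eq, pySplitDot_eq (cs := rest)]
  cases hdw : rest.dropWhile pvNotDot with
  | nil => simp [List.dropWhile, List.takeWhile, pvNotDot, hc, hdw, pvMapFirst]
  | cons d t => simp [List.dropWhile, List.takeWhile, pvNotDot, hc, hdw, pvMapFirst]

lemma splitOn_go_dot (fuel : Nat) :
    ∀ (l cur : List Char) (acc : List (List Char)), l.length ≤ fuel →
      PySem.Chars.splitOn.go ['.'] fuel l cur acc
        = acc.reverse ++ pvMapFirst (cur.reverse ++ ·) (pySplitDot l) := by
  induction fuel with
  | zero =>
    intro l cur acc h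
    have hl : l = [] := List.length_eq_zero_iff.mp (Nat.le_zero.mp h)
    subst hl
    simp [PySem.Chars.splitOn.go, pySplitDot_nil, pvMapFirst]
  | succ f ih =>
    intro l cur acc h
    cases l with
    | nil => simp [PySem.Chars.splitOn.go, pySplitDot_nil, pvMapFirst]
    | cons c rest =>
      by_cases hc : c = '.'
      · subst hc
        have hpre : List.isPrefixOf ['.'] ('.' :: rest) = true := by simp [List.isPrefixOf]
        rw [PySem.Chars.splitOn.go]
        simp only [hpre, if_true]
        rw [ih (List.drop ['.'].length ('.' :: rest)) [] (cur.reverse :: acc)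
            (by simpa using Nat.le_of_succ_le_succ h)]
        rw [pySplitDot_cons_dot]
        cases hps : pySplitDot rest with
        | nil => exact absurd hps (pySplitDot_ne_nil rest)
        | cons p ps => simp [pvMapFirst, hps]
      · have hpre : List.isPrefixOf ['.'] (c :: rest) = false := by
          simp [List.isPrefixOf]; exact fun hh => absurd hh.symm hc
        rw [PySem.Chars.splitOn.go]
        simp only [hpre, Bool.false_eq_true, if_false]
        rw [ih rest (c :: cur) acc (by simpa using Nat.le_of_succ_le_succ h)]
        rw [pySplitDot_cons_ne c rest hc]
        cases hps : pySplitDot rest with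
        | nil => exact absurd hps (pySplitDot_ne_nil rest)
        | cons p ps => simp [pvMapFirst]

lemma splitOn_dot (cs : List Char) :
    PySem.Chars.splitOn cs ['.'] = pySplitDot cs := by
  unfold PySem.Chars.splitOn
  rw [splitOn_go_dot (cs.length + 1) cs [] [] (by omega)]
  cases hps : pySplitDot cs with
  | nil => exact absurd hps (pySplitDot_ne_nil cs)
  | cons p ps => simp [pvMapFirst]

lemma pvScanB_one (t : List Char) :
    pvScanB t 1 = (t.takeWhile pvNotDot).filter PySem.Chars.isdigit := by
  induction t with
  | nil => simp [pvScanB]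
  | cons c cs ih =>
    by_cases hc : c = '.'
    · subst hc; simp [pvScanB, List.takeWhile, pvNotDot]
    · by_cases hd : PySem.Chars.isdigit c = true <;>
        simp [pvScanB, List.takeWhile, pvNotDot, hc, hd, ih]

lemma pvScanB_zero (cs : List Char) :
    pvScanB cs 0 =
      match cs.dropWhile pvNotDot with
      | [] => cs.filter PySem.Chars.isdigit
      | _ :: t => ((cs.takeWhile pvNotDot).filter PySem.Chars.isdigit) ++ '.' :: pvScanB t 1 := by
  induction cs with
  | nil => simp [pvScanB]
  | cons c cs ih =>
    by_cases hc : c = '.'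
    · subst hc; simp [pvScanB, List.dropWhile, List.takeWhile, pvNotDot]
    · have hnd : pvNotDot c = true := by simp [pvNotDot, hc]
      rw [pvScanB, if_neg hc, List.dropWhile_cons_of_pos hnd, List.takeWhile_cons_of_pos hnd, ih]
      cases hdw : cs.dropWhile pvNotDot with
      | nil => by_cases hd : PySem.Chars.isdigit c = true <;> simp [hd, List.filter]
      | cons d t => by_cases hd : PySem.Chars.isdigit c = true <;> simp [hd, List.filter]

lemma head_dropWhile_dot {cs t : List Char} {d : Char}
    (h : cs.dropWhile pvNotDot = d :: t) : d = '.' := by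
  have := List.head_dropWhile_not (p := pvNotDot) (l := cs) (by simp [h])
  simp [h, pvNotDot] at this
  exact this

theorem getdistance_spec_aux (cs : List Char) :
    (if PySem.Chars.isIn ['.'] cs then
      ((((PySem.List.pyGet? (PySem.Chars.splitOn cs ['.']) 0).getD []).filter PySem.Chars.isdigit)
        ++ '.' :: (((PySem.List.pyGet? (PySem.Chars.splitOn cs ['.']) 1).getD []).filter PySem.Chars.isdigit))
    else (cs.filter PySem.Chars.isdigit)) = pvScanB cs 0 := by
  by_cases hin : PySem.Chars.isIn ['.'] cs = true
  · have hmem : '.' ∈ cs := by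
      obtain ⟨s₁, s₂, hs⟩ := (PySem.Chars.isIn_iff_infix ['.'] cs).mp hin
      rw [← hs]; simp
    cases hdw : cs.dropWhile pvNotDot with
    | nil =>
      exfalso
      have := List.dropWhile_eq_nil_iff.mp hdw '.' hmem
      simp [pvNotDot] at this
    | cons d t =>
      have hd : d = '.' := head_dropWhile_dot hdw
      subst hd
      rw [if_pos hin, splitOn_dot, pvScanB_zero, hdw]
      have hps : pySplitDot cs = cs.takeWhile pvNotDot :: pySplitDot t := by
        rw [pySplitDot_eq]; simp [hdw]
      have hps2 : ∃ rest, pySplitDot t = (t.takeWhile pvNotDot) :: rest := by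
        rw [pySplitDot_eq]
        cases h2 : t.dropWhile pvNotDot <;> exact ⟨_, rfl⟩
      obtain ⟨rest, hrest⟩ := hps2
      rw [hps, hrest]
      simp [PySem.List.pyGet?, PySem.List.pyIdx?, pvScanB_one,
        show (0:Int) ≤ (rest.length:Int) + 1 by omega]
  · have hnmem : '.' ∉ cs := by
      intro hmem
      apply hin
      exact (PySem.Chars.isIn_iff_infix ['.'] cs).mpr
        (by obtain ⟨p, q, h⟩ := List.mem_iff_append.mp hmem; exact ⟨p, q, by simp [h]⟩)
    have hdw : cs.dropWhile pvNotDot = [] :=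
      List.dropWhile_eq_nil_iff.mpr
        (fun x hx => by simp [pvNotDot]; intro h; subst h; exact hnmem hx)
    rw [if_neg (by simp [hin]), pvScanB_zero, hdw]

-- ===== VERDICT (by name: the statement is the Claim_ definition above) =====
theorem getdistance_spec : Claim_equal_getdistance := by
  intro s _
  unfold Spec_getdistance getdistance getdistance_alt
  by_cases h : PySem.Chars.isIn ['.'] s.toList = true <;>
    · have := getdistance_spec_aux s.toList
      simp only [h, if_true, Bool.false_eq_true, if_false] at this ⊢
      rw [this]
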